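-- pv_equiv track=rewrite | github.com/BasemRajjoub/mpl_animator | mpl_animator.py | _inject_agg
-- ===== SOURCE A (Python) =====
-- def _inject_agg(static_stmts):
--     result = []
--     agg_done = False
--     for stmt in static_stmts:
--         if "matplotlib.use" in stmt:
--             continue
--         if not agg_done and ("import matplotlib" in stmt or "pyplot" in stmt):
--             result.append("import matplotlib; matplotlib.use('Agg')")
--             agg_done = True
--         result.append(stmt)
--     if not agg_done:
--         result.insert(0, "import matplotlib; matplotlib.use('Agg')")
--     return result
-- ===== SOURCE B (Python) =====
-- AGG = "import matplotlib; matplotlib.use('Agg')"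
--
--
-- def _inject_agg(static_stmts):
--     kept = [s for s in static_stmts if "matplotlib.use" not in s]
--     idx = next((i for i, s in enumerate(kept)
--                 if "import matplotlib" in s or "pyplot" in s), 0)
--     return kept[:idx] + [AGG] + kept[idx:]
-- ===== Notes on version B (the rewrite author's own statement) =====
-- stated objective: simpler
-- what changed: Replaces A's single flag-driven interleaved pass with a filter-then-locate-then-insert decomposition: drop the matplotlib.use lines, find the first anchor index in the filtered list, and splice the Agg statement in by slicing (front if no anchor).
import Mathlib
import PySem

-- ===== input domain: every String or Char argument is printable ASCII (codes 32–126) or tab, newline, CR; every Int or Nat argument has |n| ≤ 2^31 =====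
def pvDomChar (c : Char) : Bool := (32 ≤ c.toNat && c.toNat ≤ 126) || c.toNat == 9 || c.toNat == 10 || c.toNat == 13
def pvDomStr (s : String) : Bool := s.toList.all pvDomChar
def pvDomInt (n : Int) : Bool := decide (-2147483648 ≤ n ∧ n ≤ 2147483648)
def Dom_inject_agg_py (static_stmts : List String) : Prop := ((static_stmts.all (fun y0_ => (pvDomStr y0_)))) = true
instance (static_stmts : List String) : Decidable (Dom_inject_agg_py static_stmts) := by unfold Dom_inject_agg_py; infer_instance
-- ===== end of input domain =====

-- B replaces A's single flag-driven interleaved pass with a filter-then-locate-then-insert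
-- decomposition (objective: simpler).

def aggStmt : String := "import matplotlib; matplotlib.use('Agg')"

-- ===== PORT A =====
-- A's for-loop over (result, agg_done) state, then the trailing insert at 0.
def inject_agg_py (static_stmts : List String) : List String :=
  let st := static_stmts.foldl (fun (acc : List String × Bool) stmt =>
    let (result, agg_done) := acc
    if PySem.Str.isIn "matplotlib.use" stmt then (result, agg_done)
    else if !agg_done && (PySem.Str.isIn "import matplotlib" stmt || PySem.Str.isIn "pyplot" stmt) then
      (result ++ [aggStmt] ++ [stmt], true)
    else (result ++ [stmt], agg_done)) ([], false)
  if !st.2 then aggStmt :: st.1 else st.1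

-- ===== PORT B =====
-- Source B: filter out matplotlib.use lines, locate the first anchor, splice by slicing.
def inject_agg_py_alt (static_stmts : List String) : List String :=
  let kept := static_stmts.filter (fun s => !PySem.Str.isIn "matplotlib.use" s)
  let idx := (kept.findIdx? (fun s =>
      PySem.Str.isIn "import matplotlib" s || PySem.Str.isIn "pyplot" s)).getD 0
  kept.take idx ++ [aggStmt] ++ kept.drop idx

-- ===== PRECONDITION & SPEC =====
def Spec_inject_agg_py (static_stmts : List String) (out : List String) : Prop := out = inject_agg_py_alt static_stmts
instance (static_stmts : List String) (out : List String) : Decidable (Spec_inject_agg_py static_stmts out) := by unfold Spec_inject_agg_py; infer_instance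

-- ===== CLAIM (what is proved, stated in full; the proofs are below) =====
def Claim_equal_inject_agg_py : Prop := ∀ (static_stmts : List String), Dom_inject_agg_py static_stmts → Spec_inject_agg_py static_stmts (inject_agg_py static_stmts)

-- ===== LEMMAS AND PROOFS =====

-- Abbreviations for the two string predicates (proof-side only; definitionally the port's tests).
def isUse (s : String) : Bool := PySem.Str.isIn "matplotlib.use" s
def isAnchor (s : String) : Bool :=
  PySem.Str.isIn "import matplotlib" s || PySem.Str.isIn "pyplot" s

def aStep (acc : List String × Bool) (stmt : String) : List String × Bool :=
  let (result, agg_done) := acc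
  if isUse stmt then (result, agg_done)
  else if !agg_done && isAnchor stmt then (result ++ [aggStmt] ++ [stmt], true)
  else (result ++ [stmt], agg_done)

-- Definitional restatements of the two ports in the isUse/isAnchor vocabulary.
theorem portA_unfold (l : List String) :
    inject_agg_py l =
      (let st := l.foldl aStep ([], false)
       if !st.2 then aggStmt :: st.1 else st.1) := rfl

theorem portB_unfold (l : List String) :
    inject_agg_py_alt l =
      (let kept := l.filter (fun s => !isUse s)
       let idx := (kept.findIdx? isAnchor).getD 0
       kept.take idx ++ [aggStmt] ++ kept.drop idx) := rfl

-- The tail emitted by A's loop from flag state `agg`, and the final flag.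
def aEmit : List String → Bool → List String
  | [], _ => []
  | s :: r, agg =>
    if isUse s then aEmit r agg
    else if !agg && isAnchor s then aggStmt :: s :: aEmit r true
    else s :: aEmit r agg

def aFlag : List String → Bool → Bool
  | [], agg => agg
  | s :: r, agg =>
    if isUse s then aFlag r agg
    else if !agg && isAnchor s then aFlag r true
    else aFlag r agg

theorem foldl_eq_aEmit (l : List String) (acc : List String) (agg : Bool) :
    l.foldl aStep (acc, agg) = (acc ++ aEmit l agg, aFlag l agg) := by
  induction l generalizing acc agg with
  | nil => simp [aEmit, aFlag]
  | cons s r ih =>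
    simp only [List.foldl_cons, aEmit, aFlag, aStep]
    by_cases hu : isUse s = true
    · simp [hu, ih]
    · by_cases ha : (!agg && isAnchor s) = true
      · simp [hu, ha, ih]
      · simp [hu, ha, ih]

-- Once the flag is set, A's loop just emits the kept lines.
theorem aEmit_true (l : List String) :
    aEmit l true = l.filter (fun s => !isUse s) := by
  induction l with
  | nil => simp [aEmit]
  | cons s r ih =>
    by_cases hu : isUse s = true <;> simp [aEmit, hu, ih]

theorem aFlag_true (l : List String) : aFlag l true = true := by
  induction l with
  | nil => rfl
  | cons s r ih =>
    by_cases hu : isUse s = true <;> simp [aFlag, hu, ih]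

-- The core: A's loop from flag false computes B's splice on the filtered list.
theorem aEmit_false (l : List String) :
    (aEmit l false =
      (let kept := l.filter (fun s => !isUse s)
       match kept.findIdx? isAnchor with
       | none => kept
       | some i => kept.take i ++ aggStmt :: kept.drop i)) ∧
    aFlag l false = ((l.filter (fun s => !isUse s)).findIdx? isAnchor).isSome := by
  induction l with
  | nil => simp [aEmit, aFlag]
  | cons s r ih =>
    obtain ⟨ihE, ihF⟩ := ih
    by_cases hu : isUse s = true
    · have hfil : (s :: r).filter (fun s => !isUse s) = r.filter (fun s => !isUse s) := by
        simp [hu]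
      rw [hfil]
      have hE : aEmit (s :: r) false = aEmit r false := by simp [aEmit, hu]
      have hFl : aFlag (s :: r) false = aFlag r false := by simp [aFlag, hu]
      rw [hE, hFl]
      exact ⟨ihE, ihF⟩
    · by_cases ha : isAnchor s = true
      · simp [aEmit, aFlag, hu, ha, List.findIdx?_cons, aEmit_true, aFlag_true]
      · simp only [aEmit, aFlag, hu, ha, List.filter_cons, List.findIdx?_cons,
          Bool.not_false, if_neg, if_pos, Bool.false_eq_true, not_false_iff]
        cases hf : (r.filter (fun s => !isUse s)).findIdx? isAnchor with
        | none =>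
          constructor
          · simp [ihE, hf]
          · simp [ihF, hf]
        | some i =>
          constructor
          · simp [ihE, hf]
          · simp [ihF, hf]

-- ===== VERDICT (by name: the statement is the Claim_ definition above) =====
theorem inject_agg_py_spec : Claim_equal_inject_agg_py := by
  intro l _
  unfold Spec_inject_agg_py
  rw [portA_unfold, portB_unfold]
  rw [foldl_eq_aEmit]
  obtain ⟨hE, hF⟩ := aEmit_false l
  simp only [List.nil_append]
  rw [hE, hF]
  cases hf : ((l.filter (fun s => !isUse s)).findIdx? isAnchor) with
  | none => simp [hf]
  | some i => simp [hf]
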